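-- pv_equiv track=rewrite | github.com/icsecs1992/TensorGuard | scrapers/handy_git_scraper.py | split_multiple_diffs
-- ===== SOURCE A (Python) =====
-- def split_multiple_diffs(lines):
--     diffs = []
--     current_diff_block = []
--     for line in lines:
--         if line.startswith('@@'):
--             if current_diff_block:
--                 diffs.append('\n'.join(current_diff_block))
--                 current_diff_block = []
--         current_diff_block.append(line)
--     if current_diff_block:
--         diffs.append('\n'.join(current_diff_block))
--     return diffs
-- ===== SOURCE B (Python) =====
-- def split_multiple_diffs(lines):
--     lines = list(lines)
--     blocks = []
--     rest = lines
--     while rest: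
--         head = rest[0]
--         body = rest[1:]
--         k = 0
--         while k < len(body) and not body[k].startswith('@@'):
--             k += 1
--         blocks.append('\n'.join([head] + body[:k]))
--         rest = body[k:]
--     return blocks
-- ===== Notes on version B (the rewrite author's own statement) =====
-- stated objective: alternative
-- what changed: Replaced A's streaming flush-on-marker accumulator with a block-at-a-time scan: repeatedly take the head line plus the following run of non-'@@' lines as one slice, join it, and advance past the run.
import Mathlib
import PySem

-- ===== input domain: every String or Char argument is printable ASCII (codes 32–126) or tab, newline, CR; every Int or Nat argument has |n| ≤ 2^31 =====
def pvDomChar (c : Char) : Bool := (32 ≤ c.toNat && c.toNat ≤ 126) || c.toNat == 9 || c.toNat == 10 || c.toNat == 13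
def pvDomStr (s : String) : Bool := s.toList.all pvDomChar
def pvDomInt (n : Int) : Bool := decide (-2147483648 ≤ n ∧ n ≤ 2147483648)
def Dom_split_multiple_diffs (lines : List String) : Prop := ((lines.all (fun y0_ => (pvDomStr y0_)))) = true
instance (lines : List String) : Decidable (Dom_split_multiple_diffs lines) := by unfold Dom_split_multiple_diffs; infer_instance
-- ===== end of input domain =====

-- Header: B splits block-at-a-time (head + run of non-'@@' lines, then advance) instead of A's
-- streaming flush-on-marker accumulator; alternative decomposition, same cost. Return values proved equal.

-- ===== PORT A =====
def pvStepA (st : List String × List String) (line : String) : List String × List String :=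
  let diffs := st.1
  let cur := st.2
  if PySem.Str.startswith line "@@" then
    if cur ≠ [] then (diffs ++ [PySem.Str.join "\n" cur], [line])
    else (diffs, cur ++ [line])
  else (diffs, cur ++ [line])

-- the final 'if current_diff_block: diffs.append(...)' of A
def pvFinishA (st : List String × List String) : List String :=
  if st.2 ≠ [] then st.1 ++ [PySem.Str.join "\n" st.2] else st.1

def split_multiple_diffs (lines : List String) : List String :=
  pvFinishA (lines.foldl pvStepA ([], []))

-- ===== PORT B =====
-- inner while loop of Source B: length of the leading run of lines not starting with '@@'
def pvFindK (body : List String) : Nat :=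
  match body with
  | [] => 0
  | b :: bs => if PySem.Str.startswith b "@@" then 0 else pvFindK bs + 1

-- outer while loop of Source B
def pvAltLoop (blocks rest : List String) : List String :=
  match rest with
  | [] => blocks
  | head :: body =>
    let k := pvFindK body
    pvAltLoop (blocks ++ [PySem.Str.join "\n" (head :: body.take k)]) (body.drop k)
termination_by rest.length
decreasing_by simp

def split_multiple_diffs_alt (lines : List String) : List String :=
  pvAltLoop [] lines

-- ===== PRECONDITION & SPEC =====
def Spec_split_multiple_diffs (lines : List String) (out : List String) : Prop := out = split_multiple_diffs_alt lines
instance (lines : List String) (out : List String) : Decidable (Spec_split_multiple_diffs lines out) := by unfold Spec_split_multiple_diffs; infer_instance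

-- ===== CLAIM (what is proved, stated in full; the proofs are below) =====
def Claim_equal_split_multiple_diffs : Prop := ∀ (lines : List String), Dom_split_multiple_diffs lines → Spec_split_multiple_diffs lines (split_multiple_diffs lines)

-- ===== LEMMAS AND PROOFS =====

theorem pvAltLoop_nil (blocks : List String) : pvAltLoop blocks [] = blocks := by
  rw [pvAltLoop.eq_def]

theorem pvAltLoop_cons (blocks : List String) (head : String) (body : List String) :
    pvAltLoop blocks (head :: body) =
      pvAltLoop (blocks ++ [PySem.Str.join "\n" (head :: body.take (pvFindK body))])
        (body.drop (pvFindK body)) := by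
  rw [pvAltLoop.eq_def]

theorem pvStepA_fst (d c : List String) (x : String) :
    pvStepA (d, c) x = (d ++ (pvStepA ([], c) x).1, (pvStepA ([], c) x).2) := by
  unfold pvStepA
  by_cases hc : c = []
  · subst hc; split_ifs <;> simp
  · split_ifs <;> simp_all

-- the diffs component of A's fold only grows by appending: the initial diffs is a prefix
theorem pvStepA_diffs_prefix (rest : List String) (d c : List String) :
    rest.foldl pvStepA (d, c) =
      (d ++ (rest.foldl pvStepA ([], c)).1, (rest.foldl pvStepA ([], c)).2) := by
  induction rest generalizing d c with
  | nil => simp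
  | cons x xs ih =>
    simp only [List.foldl_cons]
    rw [pvStepA_fst, ih]
    conv_rhs => rw [show pvStepA ([], c) x = ((pvStepA ([], c) x).1, (pvStepA ([], c) x).2) from rfl, ih]
    simp

-- B's outer loop only appends to its accumulator
theorem pvAltLoop_acc (rest : List String) : ∀ (blocks : List String),
    pvAltLoop blocks rest = blocks ++ pvAltLoop [] rest := by
  have key : ∀ (n : Nat) (rest : List String), rest.length ≤ n → ∀ (blocks : List String),
      pvAltLoop blocks rest = blocks ++ pvAltLoop [] rest := by
    intro n
    induction n with
    | zero =>
      intro rest h blocks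
      have hr : rest = [] := by cases rest <;> simp_all
      simp [hr, pvAltLoop_nil]
    | succ n ih =>
      intro rest h blocks
      cases rest with
      | nil => simp [pvAltLoop_nil]
      | cons head body =>
        rw [pvAltLoop_cons, pvAltLoop_cons]
        have hlen : (body.drop (pvFindK body)).length ≤ n := by
          simp at h ⊢; omega
        rw [ih _ hlen, ih _ hlen ([] ++ _)]
        simp
  exact key rest.length rest le_rfl

-- core invariant: with a nonempty current block c, A's remaining fold produces
-- the block c ++ (leading non-marker run) followed by B's loop on the rest
theorem pvMain (rest : List String) (c : List String) (hc : c ≠ []) :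
    pvFinishA (rest.foldl pvStepA ([], c)) =
      PySem.Str.join "\n" (c ++ rest.take (pvFindK rest)) ::
        pvAltLoop [] (rest.drop (pvFindK rest)) := by
  induction rest generalizing c with
  | nil => simp [pvFinishA, hc, pvFindK, pvAltLoop_nil]
  | cons x xs ih =>
    by_cases h : PySem.Chars.startswith x.toList ['@', '@'] = true
    · have hstep : pvStepA ([], c) x = ([PySem.Str.join "\n" c], [x]) := by
        unfold pvStepA; simp [h, hc]
      have hk : pvFindK (x :: xs) = 0 := by simp [pvFindK, h]
      simp only [List.foldl_cons, hstep, hk, List.take_zero, List.drop_zero]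
      rw [pvStepA_diffs_prefix]
      have hfin : pvFinishA (([PySem.Str.join "\n" c] ++ (xs.foldl pvStepA ([], [x])).1,
          (xs.foldl pvStepA ([], [x])).2)) =
          [PySem.Str.join "\n" c] ++ pvFinishA (xs.foldl pvStepA ([], [x])) := by
        simp only [pvFinishA]
        split_ifs <;> simp
      rw [hfin, ih [x] (by simp), pvAltLoop_cons]
      conv_rhs => rw [pvAltLoop_acc]
      simp
    · have hstep : pvStepA ([], c) x = ([], c ++ [x]) := by
        unfold pvStepA; simp [h]
      have hk : pvFindK (x :: xs) = pvFindK xs + 1 := by simp [pvFindK, h]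
      simp only [List.foldl_cons, hstep, hk, List.take_succ_cons, List.drop_succ_cons]
      rw [ih (c ++ [x]) (by simp)]
      simp

-- ===== VERDICT (by name: the statement is the Claim_ definition above) =====
theorem split_multiple_diffs_spec : Claim_equal_split_multiple_diffs := by
  intro lines _
  unfold Spec_split_multiple_diffs split_multiple_diffs split_multiple_diffs_alt
  cases lines with
  | nil => simp [pvFinishA, pvAltLoop_nil]
  | cons head body =>
    have hstep : pvStepA ([], []) head = ([], [head]) := by
      unfold pvStepA; split_ifs <;> simp
    simp only [List.foldl_cons, hstep]
    rw [pvMain body [head] (by simp), pvAltLoop_cons]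
    conv_rhs => rw [pvAltLoop_acc]
    simp
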